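-- pv_equiv track=rewrite | github.com/OilProducts/agent-skills | local-comfy-image-gen/orchestrator/run_page.py | interpolate_template
-- ===== SOURCE A (Python) =====
-- from typing import Any, Dict, List, Optional
--
-- def resolve_dotted(data: Any, dotted: str) -> Any:
--     cur = data
--     for part in dotted.split("."):
--         if isinstance(cur, dict) and part in cur:
--             cur = cur[part]
--             continue
--         raise KeyError(dotted)
--     return cur
--
-- def interpolate_template(template: str, context: Dict[str, Any]) -> str:
--     output = []
--     i = 0
--     while i < len(template):
--         start = template.find("{", i)
--         if start < 0:
--             output.append(template[i:])
--             break
--         end = template.find("}", start + 1)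
--         if end < 0:
--             output.append(template[i:])
--             break
--         output.append(template[i:start])
--         token = template[start + 1 : end].strip()
--         if token:
--             try:
--                 value = resolve_dotted(context, token)
--             except KeyError as exc:
--                 raise KeyError(f"template placeholder not found: {token}") from exc
--             output.append(str(value))
--         i = end + 1
--     return "".join(output)
-- ===== SOURCE B (Python) =====
-- from typing import Any, Dict
--
--
-- def resolve_dotted(data: Any, dotted: str) -> Any:
--     cur = data
--     for part in dotted.split("."):
--         if isinstance(cur, dict) and part in cur:
--             cur = cur[part]
--             continue
--         raise KeyError(dotted)
--     return cur
--
--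
-- def interpolate_template(template: str, context: Dict[str, Any]) -> str:
--     # Single left-to-right character pass with a two-state machine
--     # (outside / inside a placeholder) instead of repeated find() + slicing.
--     out = []
--     buf = None  # None = outside a placeholder; else the token chars seen so far
--     for ch in template:
--         if buf is None:
--             if ch == "{":
--                 buf = []
--             else:
--                 out.append(ch)
--         elif ch == "}":
--             token = "".join(buf).strip()
--             if token:
--                 try:
--                     value = resolve_dotted(context, token)
--                 except KeyError as exc:
--                     raise KeyError(f"template placeholder not found: {token}") from exc
--                 out.append(str(value))
--             buf = None
--         else:
--             buf.append(ch)
--     if buf is not None: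
--         out.append("{" + "".join(buf))
--     return "".join(out)
-- ===== Notes on version B (the rewrite author's own statement) =====
-- stated objective: alternative
-- what changed: Replaces A's index-jumping find()/slice while-loop with a single character-at-a-time pass driven by a two-state (outside/inside-placeholder) machine; same linear cost, different traversal mechanism.
import Mathlib
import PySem

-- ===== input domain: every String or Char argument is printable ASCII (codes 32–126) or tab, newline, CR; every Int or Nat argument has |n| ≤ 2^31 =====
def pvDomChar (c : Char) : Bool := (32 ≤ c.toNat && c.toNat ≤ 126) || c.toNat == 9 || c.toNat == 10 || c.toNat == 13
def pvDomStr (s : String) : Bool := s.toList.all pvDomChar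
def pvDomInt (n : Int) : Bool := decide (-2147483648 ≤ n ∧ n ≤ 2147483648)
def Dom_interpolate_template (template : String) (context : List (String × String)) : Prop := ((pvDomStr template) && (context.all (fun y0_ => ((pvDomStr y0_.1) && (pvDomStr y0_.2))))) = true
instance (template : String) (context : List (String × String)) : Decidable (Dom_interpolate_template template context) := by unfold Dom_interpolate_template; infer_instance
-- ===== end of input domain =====

-- B replaces A's index-jumping find()/slice while-loop with a single character pass driven by a
-- two-state (outside/inside-placeholder) machine; same linear cost, a different traversal mechanism.

-- ===== PORT A =====
-- Helper shared verbatim by both Python files (Source A and Source B define the identical resolve_dotted):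
-- A loops over dotted.split("."): the first part is looked up in the dict (KeyError if absent);
-- on any later part cur is a string, not a dict, so A raises KeyError — `none` in those cases.
def resolve_dotted (context : List (String × String)) (dotted : List Char) : Option (List Char) :=
  match PySem.Chars.splitOn dotted ['.'] with
  | [p] => ((PySem.Dict.mk context).get? (String.ofList p)).map String.toList
  | _ => none

-- A's while loop. `rest` is template[i:], `acc` the output joined so far; template.find("{", i)
-- equals i + find(rest, "{") (and likewise for "}"), so each iteration computes the same pieces.
def interp_loopA (context : List (String × String)) (acc : List Char) (rest : List Char) : List Char :=
  if h : rest = [] then acc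
  else
    let start := PySem.Chars.find rest ['{']          -- template.find("{", i) - i
    if start < 0 then acc ++ rest
    else
      let after := rest.drop (start.toNat + 1)        -- template[start+1:]
      let e := PySem.Chars.find after ['}']           -- template.find("}", start+1) - (start+1)
      if e < 0 then acc ++ rest
      else
        let token := PySem.Chars.strip (after.take e.toNat)
        let acc' := acc ++ rest.take start.toNat ++
          (if token ≠ [] then ((resolve_dotted context token).getD []) else [])
        interp_loopA context acc' (after.drop (e.toNat + 1))
termination_by rest.length
decreasing_by
  simp only [List.length_drop]
  have : rest.length ≠ 0 := by simpa [List.length_eq_zero_iff] using h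
  omega

def interpolate_template (template : String) (context : List (String × String)) : String :=
  String.ofList (interp_loopA context [] template.toList)

-- ===== PORT B =====
-- One step of B's for-loop: state = (output so far, None | token chars of an open placeholder).
def stepB (context : List (String × String)) (s : List Char × Option (List Char)) (ch : Char) :
    List Char × Option (List Char) :=
  match s.2 with
  | none => if ch = '{' then (s.1, some []) else (s.1 ++ [ch], none)
  | some buf =>
    if ch = '}' then
      let token := PySem.Chars.strip buf
      ((if token ≠ [] then s.1 ++ ((resolve_dotted context token).getD []) else s.1), none)
    else (s.1, some (buf ++ [ch]))

-- B's trailing `if buf is not None: out.append("{" + "".join(buf))`.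
def finishB (s : List Char × Option (List Char)) : List Char :=
  match s.2 with
  | none => s.1
  | some buf => s.1 ++ '{' :: buf

def interpolate_template_alt (template : String) (context : List (String × String)) : String :=
  String.ofList (finishB (template.toList.foldl (stepB context) ([], none)))

-- ===== PRECONDITION & SPEC =====
-- The stripped contents of the placeholders of the template, in order (the tokens A resolves).
def pvTokens (cs : List Char) (st : Option (List Char)) : List (List Char) :=
  match cs, st with
  | [], _ => []
  | c :: rest, none => if c = '{' then pvTokens rest (some []) else pvTokens rest none
  | c :: rest, some buf =>
      if c = '}' then (PySem.Chars.strip buf) :: pvTokens rest none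
      else pvTokens rest (some (buf ++ [c]))

-- Pre_ excludes exactly the inputs where Python A raises KeyError: a non-empty placeholder token
-- that contains a '.' or is not a key of context cannot be resolved by resolve_dotted.
def Pre_interpolate_template (template : String) (context : List (String × String)) : Prop :=
  ∀ t ∈ pvTokens template.toList none, t ≠ [] → ('.' ∉ t ∧ String.ofList t ∈ context.map Prod.fst)

instance (template : String) (context : List (String × String)) :
    Decidable (Pre_interpolate_template template context) := by
  unfold Pre_interpolate_template; infer_instance

def pvWitness_interpolate_template : String × (List (String × String)) :=
  ("hello { name }!", [("name", "world"), ("x", "1")])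

def Spec_interpolate_template (template : String) (context : List (String × String)) (out : String) : Prop := out = interpolate_template_alt template context
instance (template : String) (context : List (String × String)) (out : String) : Decidable (Spec_interpolate_template template context out) := by unfold Spec_interpolate_template; infer_instance

-- ===== CLAIM (what is proved, stated in full; the proofs are below) =====
def Claim_equal_interpolate_template : Prop := ∀ (template : String) (context : List (String × String)), Dom_interpolate_template template context → Pre_interpolate_template template context → Spec_interpolate_template template context (interpolate_template template context)

-- ===== LEMMAS AND PROOFS =====

-- a negative find result means the character does not occur
theorem find_char_neg {cs : List Char} {c : Char} (h : PySem.Chars.find cs [c] < 0) :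
    c ∉ cs := by
  have h1 : PySem.Chars.find cs [c] = -1 := by
    have := PySem.Chars.neg_one_le_find cs [c]; omega
  have := (PySem.Chars.find_eq_neg_one_iff cs [c]).mp h1
  simpa [List.singleton_infix_iff] using this

-- a nonnegative find result k splits cs into (take k, c, drop (k+1)) with no c before k
theorem find_char_split {cs : List Char} {c : Char} (h : ¬ PySem.Chars.find cs [c] < 0) :
    c ∉ cs.take (PySem.Chars.find cs [c]).toNat ∧
      cs.drop (PySem.Chars.find cs [c]).toNat =
        c :: cs.drop ((PySem.Chars.find cs [c]).toNat + 1) := by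
  have h0 : 0 ≤ PySem.Chars.find cs [c] := by omega
  obtain ⟨hpre, hmin⟩ := PySem.Chars.find_spec (s := cs) (sub := [c]) h0
  set k := (PySem.Chars.find cs [c]).toNat with hk
  obtain ⟨u, hu⟩ := hpre
  have hdropk : cs.drop k = c :: u := hu.symm
  constructor
  · intro hc
    obtain ⟨i, hi, hgi⟩ := List.mem_take_iff_getElem.mp hc
    obtain ⟨hik, hil⟩ := Nat.lt_min.mp hi
    refine hmin i hik ⟨cs.drop (i + 1), ?_⟩
    rw [List.drop_eq_getElem_cons hil (l := cs), hgi]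
    rfl
  · have : cs.drop (k + 1) = u := by
      rw [show k + 1 = k + 1 from rfl, ← List.drop_drop, hdropk]
      simp
    rw [hdropk, this]

-- folding B's step from the outside state over brace-free text just copies it to the output
theorem foldl_stepB_text (context : List (String × String)) :
    ∀ (cs acc : List Char), '{' ∉ cs →
      cs.foldl (stepB context) (acc, none) = (acc ++ cs, none) := by
  intro cs
  induction cs with
  | nil => intro acc _; simp
  | cons c cs ih =>
    intro acc h
    have hc : ¬ c = '{' := fun hc => h (hc ▸ List.mem_cons_self)
    have hcs : '{' ∉ cs := fun hm => h (List.mem_cons_of_mem _ hm)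
    simp only [List.foldl_cons, stepB, if_neg hc]
    rw [ih (acc ++ [c]) hcs]
    simp

-- folding B's step from the inside state over '}'-free text just extends the token buffer
theorem foldl_stepB_buf (context : List (String × String)) :
    ∀ (cs acc buf : List Char), '}' ∉ cs →
      cs.foldl (stepB context) (acc, some buf) = (acc, some (buf ++ cs)) := by
  intro cs
  induction cs with
  | nil => intro acc buf _; simp
  | cons c cs ih =>
    intro acc buf h
    have hc : ¬ c = '}' := fun hc => h (hc ▸ List.mem_cons_self)
    have hcs : '}' ∉ cs := fun hm => h (List.mem_cons_of_mem _ hm)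
    simp only [List.foldl_cons, stepB, if_neg hc]
    rw [ih acc (buf ++ [c]) hcs]
    simp

theorem interp_loop_eq_aux (context : List (String × String)) :
    ∀ (n : Nat) (cs : List Char), cs.length ≤ n → ∀ (acc : List Char),
      interp_loopA context acc cs = finishB (cs.foldl (stepB context) (acc, none)) := by
  intro n
  induction n with
  | zero =>
    intro cs hlen acc
    have : cs = [] := by
      cases cs with
      | nil => rfl
      | cons c cs => simp at hlen
    subst this
    rw [interp_loopA]
    simp [finishB]
  | succ n ih =>
    intro cs hlen acc
    rw [interp_loopA]
    by_cases hnil : cs = []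
    · subst hnil; simp [finishB]
    · simp only [dif_neg hnil]
      by_cases hs : PySem.Chars.find cs ['{'] < 0
      · -- no '{': A emits the rest verbatim; B copies every character
        rw [if_pos hs, foldl_stepB_text context cs acc (find_char_neg hs)]
        simp [finishB]
      · rw [if_neg hs]
        obtain ⟨hpre, hdrop⟩ := find_char_split hs
        set k := (PySem.Chars.find cs ['{']).toNat with hk
        have hcs : cs = cs.take k ++ '{' :: cs.drop (k + 1) := by
          conv_lhs => rw [← List.take_append_drop k cs]
          rw [hdrop]
        by_cases he : PySem.Chars.find (cs.drop (k + 1)) ['}'] < 0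
        · -- '{' without a matching '}': A emits the rest; B ends inside and re-emits "{" ++ buffer
          rw [if_pos he]
          conv_rhs => rw [hcs]
          rw [List.foldl_append, foldl_stepB_text context _ acc hpre]
          simp only [List.foldl_cons, stepB, reduceIte]
          rw [foldl_stepB_buf context _ _ _ (find_char_neg he)]
          simp only [finishB, List.nil_append]
          conv_lhs => rw [hcs]
          simp
        · rw [if_neg he]
          obtain ⟨hpre2, hdrop2⟩ := find_char_split he
          set a := cs.drop (k + 1) with ha
          set e := (PySem.Chars.find a ['}']).toNat with he2
          have hA : a = a.take e ++ '}' :: a.drop (e + 1) := by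
            conv_lhs => rw [← List.take_append_drop e a]
            rw [hdrop2]
          have hlen2 : (a.drop (e + 1)).length ≤ n := by
            have h1 : a.length ≤ cs.length - (k + 1) := by simp [ha]
            have h2 : (a.drop (e + 1)).length = a.length - (e + 1) := by simp
            have h3 : 0 < cs.length := List.length_pos_iff.mpr hnil
            omega
          conv_rhs => rw [hcs, hA]
          rw [List.foldl_append, foldl_stepB_text context _ acc hpre]
          simp only [List.foldl_cons, stepB, reduceIte]
          rw [List.foldl_append, foldl_stepB_buf context _ _ _ hpre2]
          simp only [List.foldl_cons, stepB, reduceIte, List.nil_append]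
          rw [ih _ hlen2]
          by_cases ht : PySem.Chars.strip (a.take e) ≠ []
          · simp only [if_pos ht, List.append_assoc]
          · simp only [if_neg ht, List.append_assoc, List.append_nil]

theorem interp_loop_eq (context : List (String × String)) (cs acc : List Char) :
    interp_loopA context acc cs = finishB (cs.foldl (stepB context) (acc, none)) :=
  interp_loop_eq_aux context cs.length cs le_rfl acc

-- ===== VERDICT (by name: the statement is the Claim_ definition above) =====
theorem interpolate_template_spec : Claim_equal_interpolate_template := by
  intro template context _ _
  unfold Spec_interpolate_template interpolate_template interpolate_template_alt
  rw [interp_loop_eq]
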